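-- pv_equiv track=rewrite | github.com/nin9/CTCI-6th | Chapter08/4-powerSet.py | convertIntToSet
-- ===== SOURCE A (Python) =====
-- from typing import List
--
-- def convertIntToSet(arr: List[int], num: int):
--   subset = []
--   index = 0
--   k = num
--   while k > 0:
--     if (k & 1) == 1:
--       subset.append(arr[index])
--     index += 1
--     k >>= 1
--   return subset
-- ===== SOURCE B (Python) =====
-- from typing import List
--
-- def convertIntToSet(arr: List[int], num: int):
--   # Walk only the SET bits of the mask: isolate the lowest set bit with k & -k,
--   # locate it with bit_length, pick that element, and clear the bit with xor.
--   subset = []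
--   k = num
--   while k > 0:
--     lowest = k & -k
--     subset.append(arr[lowest.bit_length() - 1])
--     k ^= lowest
--   return subset
-- ===== Notes on version B (the rewrite author's own statement) =====
-- stated objective: alternative
-- what changed: A scans every bit position of the mask (shift right by one each iteration, testing k&1 with a manual index counter); B iterates only over the SET bits: each step isolates the lowest set bit with k & -k, finds its position via bit_length()-1, and clears it with xor, so the loop runs once per set bit instead of once per bit position.
import Mathlib
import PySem

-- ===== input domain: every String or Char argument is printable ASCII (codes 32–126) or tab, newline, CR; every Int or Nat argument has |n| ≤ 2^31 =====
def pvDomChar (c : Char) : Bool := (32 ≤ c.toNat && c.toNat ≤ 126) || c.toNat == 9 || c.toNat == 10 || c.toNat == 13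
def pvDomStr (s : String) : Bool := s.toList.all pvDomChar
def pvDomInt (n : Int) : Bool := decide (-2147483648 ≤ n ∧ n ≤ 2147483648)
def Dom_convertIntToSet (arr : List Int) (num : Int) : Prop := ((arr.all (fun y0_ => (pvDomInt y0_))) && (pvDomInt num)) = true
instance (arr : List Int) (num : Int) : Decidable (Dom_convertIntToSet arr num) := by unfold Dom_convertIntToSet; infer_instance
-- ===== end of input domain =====

-- B replaces A's scan over every bit position of the mask by a loop over the SET bits only
-- (isolate the lowest set bit with k & -k, index it via bit_length, clear it with xor);
-- objective: alternative, same cost class.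

-- ===== PORT A =====
-- needed by goA's termination proof (cited in decreasing_by)
theorem shr1_eq_div (m : Int) : m >>> (1:Int) = m / 2 := by
  rw [show (1:Int) = ((1:Nat):Int) by norm_cast, Int.shiftRight_natCast_right,
    Int.shiftRight_eq_div_pow]
  norm_num

-- A's while-loop: state (k, index, subset); `arr[index]` is pyGet? (none = IndexError,
-- excluded by Pre_; a default 0 stands in for the raise there)
def goA (arr : List Int) (k : Int) (index : Int) (subset : List Int) : List Int :=
  if 0 < k then
    goA arr (k >>> 1) (index + 1)
      (if PySem.Int.band k 1 = 1 then subset ++ [(PySem.List.pyGet? arr index).getD 0] else subset)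
  else subset
termination_by k.toNat
decreasing_by
  simp only [shr1_eq_div]
  omega

def convertIntToSet (arr : List Int) (num : Int) : List Int :=
  goA arr num 0 []

-- ===== PORT B =====
-- Nat bit lemmas needed (transitively) by goB's termination proof, so they live above the port.
theorem tbit_two_mul (x : Nat) (i : Nat) : (2*x).testBit (i+1) = x.testBit i := by
  rw [Nat.testBit_succ]; congr 1; omega

theorem tbit_two_mul_add_one (x : Nat) (i : Nat) : (2*x+1).testBit (i+1) = x.testBit i := by
  rw [Nat.testBit_succ]; congr 1; omega

theorem tbit0_even (x : Nat) : (2*x).testBit 0 = false := by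
  rw [Nat.testBit_zero]; simp

theorem tbit0_odd (x : Nat) : (2*x+1).testBit 0 = true := by
  rw [Nat.testBit_zero]; simp

theorem and_odd_pred (t : Nat) : (2*t+1) &&& (2*t) = 2*t := by
  apply Nat.eq_of_testBit_eq
  intro i
  cases i with
  | zero => rw [Nat.testBit_and, tbit0_odd, tbit0_even]; simp
  | succ i => rw [Nat.testBit_and, tbit_two_mul_add_one, tbit_two_mul]; simp

theorem and_even_pred (t : Nat) (ht : 0 < t) : (2*t) &&& (2*t-1) = 2*(t &&& (t-1)) := by
  have h : 2*t-1 = 2*(t-1)+1 := by omega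
  apply Nat.eq_of_testBit_eq
  intro i
  cases i with
  | zero => rw [Nat.testBit_and, tbit0_even, tbit0_even]; simp
  | succ i =>
      rw [Nat.testBit_and, tbit_two_mul, h, tbit_two_mul_add_one, tbit_two_mul,
        Nat.testBit_and]

theorem xor_one_odd (t : Nat) : (2*t+1) ^^^ 1 = 2*t := by
  apply Nat.eq_of_testBit_eq
  intro i
  cases i with
  | zero =>
      rw [Nat.testBit_xor, tbit0_odd, tbit0_even,
        show (1:Nat) = 2*0+1 by omega, tbit0_odd]
      simp
  | succ i =>
      rw [Nat.testBit_xor, tbit_two_mul_add_one, tbit_two_mul,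
        show (1:Nat) = 2*0+1 by omega, tbit_two_mul_add_one]
      simp [Nat.testBit_eq_false_of_lt (show (0:Nat) < 2^i by positivity)]

theorem xor_two_mul (a b : Nat) : (2*a) ^^^ (2*b) = 2*(a ^^^ b) := by
  apply Nat.eq_of_testBit_eq
  intro i
  cases i with
  | zero => rw [Nat.testBit_xor, tbit0_even, tbit0_even, tbit0_even]; simp
  | succ i => rw [Nat.testBit_xor, tbit_two_mul, tbit_two_mul, tbit_two_mul, Nat.testBit_xor]

-- the lowest set bit of m (as m - (m &&& (m-1))) is positive and clearing it shrinks m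
theorem low_spec : ∀ m : Nat, 0 < m →
    (m &&& (m-1)) < m ∧ m ^^^ (m - (m &&& (m-1))) < m := by
  intro m hm
  induction m using Nat.strong_induction_on with
  | _ m ih =>
    by_cases hpar : m % 2 = 1
    · obtain ⟨t, rfl⟩ : ∃ t, m = 2*t+1 := ⟨m/2, by omega⟩
      have h1 : (2*t+1) &&& (2*t+1-1) = 2*t := by
        have : 2*t+1-1 = 2*t := by omega
        rw [this, and_odd_pred]
      constructor
      · omega
      · rw [h1, show 2*t+1 - 2*t = 1 by omega, xor_one_odd]; omega
    · obtain ⟨t, rfl⟩ : ∃ t, m = 2*t := ⟨m/2, by omega⟩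
      have ht : 0 < t := by omega
      obtain ⟨iha, ihx⟩ := ih t (by omega) ht
      have h1 : (2*t) &&& (2*t-1) = 2*(t &&& (t-1)) := and_even_pred t ht
      constructor
      · omega
      · rw [h1, show 2*t - 2*(t &&& (t-1)) = 2*(t - (t &&& (t-1))) by omega, xor_two_mul]
        omega

-- bridge: Python's k & -k for k > 0, in Nat terms
theorem bandNeg (m : Nat) (hm : 0 < m) :
    PySem.Int.band (m:Int) (-(m:Int)) = ((m - (m &&& (m-1)) : Nat) : Int) := by
  have h0 : (0:Int) ≤ (m:Int) := by positivity
  have h1 : ¬ (0:Int) ≤ -(m:Int) := by omega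
  simp only [PySem.Int.band, if_pos h0, if_neg h1]
  have h2 : (-(-(m:Int)) - 1).toNat = m - 1 := by omega
  have h3 : ((m:Int)).toNat = m := by omega
  rw [h2, h3]

-- cited by the port's decreasing_by
theorem goB_dec (k : Int) (hk : 0 < k) :
    (PySem.Int.bxor k (PySem.Int.band k (-k))).toNat < k.toNat := by
  have hm : 0 < k.toNat := by omega
  have hk' : ((k.toNat : Nat) : Int) = k := by omega
  obtain ⟨_, hx⟩ := low_spec k.toNat hm
  rw [← hk', bandNeg k.toNat hm, PySem.Int.bxor_natCast]
  omega

-- B's while-loop over the set bits of k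
def goB (arr : List Int) (k : Int) (subset : List Int) : List Int :=
  if hk : 0 < k then
    let lowest := PySem.Int.band k (-k)
    goB arr (PySem.Int.bxor k lowest)
      (subset ++ [(PySem.List.pyGet? arr ((PySem.Int.bitLength lowest : Int) - 1)).getD 0])
  else subset
termination_by k.toNat
decreasing_by exact goB_dec k hk

def convertIntToSet_alt (arr : List Int) (num : Int) : List Int :=
  goB arr num []

-- ===== PRECONDITION & SPEC =====
-- A raises IndexError exactly when num > 0 has a set bit at position ≥ arr.length,
-- i.e. when num ≥ 2^arr.length (B raises on the very same inputs); Pre_ admits every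
-- input on which A returns.
def Pre_convertIntToSet (arr : List Int) (num : Int) : Prop :=
  num < (2:Int) ^ arr.length

instance (arr : List Int) (num : Int) : Decidable (Pre_convertIntToSet arr num) := by
  unfold Pre_convertIntToSet; infer_instance

def pvWitness_convertIntToSet : List Int × Int := ([3, 5, 7], 5)

def Spec_convertIntToSet (arr : List Int) (num : Int) (out : List Int) : Prop := out = convertIntToSet_alt arr num
instance (arr : List Int) (num : Int) (out : List Int) : Decidable (Spec_convertIntToSet arr num out) := by unfold Spec_convertIntToSet; infer_instance

-- ===== CLAIM (what is proved, stated in full; the proofs are below) =====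
def Claim_equal_convertIntToSet : Prop := ∀ (arr : List Int) (num : Int), Dom_convertIntToSet arr num → Pre_convertIntToSet arr num → Spec_convertIntToSet arr num (convertIntToSet arr num)

-- ===== LEMMAS AND PROOFS =====

-- canonical description: the ascending list of set-bit positions of m
def setBits (m : Nat) : List Nat :=
  if m = 0 then [] else (if m % 2 = 1 then [0] else []) ++ (setBits (m/2)).map (· + 1)
termination_by m
decreasing_by omega

theorem setBits_zero : setBits 0 = [] := by rw [setBits]; simp

theorem setBits_double (x : Nat) : setBits (2*x) = (setBits x).map (· + 1) := by
  by_cases hx : x = 0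
  · subst hx; simp [setBits_zero]
  · rw [setBits, if_neg (by omega)]
    have : 2*x % 2 = 0 := by omega
    rw [if_neg (by omega), show 2*x/2 = x by omega]
    simp

theorem setBits_odd (x : Nat) : setBits (2*x+1) = 0 :: (setBits x).map (· + 1) := by
  rw [setBits, if_neg (by omega), if_pos (by omega), show (2*x+1)/2 = x by omega]
  simp

-- pull the accumulator out of A's loop
theorem goA_acc (arr : List Int) (k i : Int) (s t : List Int) :
    goA arr k i (t ++ s) = t ++ goA arr k i s := by
  by_cases hk : 0 < k
  · rw [goA.eq_def]
    conv_rhs => rw [goA.eq_def]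
    rw [if_pos hk, if_pos hk]
    by_cases hc : PySem.Int.band k 1 = 1
    · rw [if_pos hc, if_pos hc, List.append_assoc]
      exact goA_acc arr (k >>> 1) (i + 1) (s ++ [(PySem.List.pyGet? arr i).getD 0]) t
    · rw [if_neg hc, if_neg hc]
      exact goA_acc arr (k >>> 1) (i + 1) s t
  · rw [goA.eq_def]
    conv_rhs => rw [goA.eq_def]
    rw [if_neg hk, if_neg hk]
termination_by k.toNat
decreasing_by
  all_goals simp only [shr1_eq_div]; omega

theorem goA_nil_acc (arr : List Int) (k i : Int) (t : List Int) :
    goA arr k i t = t ++ goA arr k i [] := by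
  simpa using goA_acc arr k i [] t

-- A computes the elements at the set-bit positions, offset by the running index
theorem mod_two_iff (k : Int) (hk : 0 < k) : PySem.Int.mod k 2 = 1 ↔ k.toNat % 2 = 1 := by
  rw [PySem.Int.mod, Int.fmod_eq_emod]
  simp
  omega

theorem goA_char (arr : List Int) (k i : Int) :
    goA arr k i [] =
      (setBits k.toNat).map (fun (j : Nat) => (PySem.List.pyGet? arr (i + (j:Int))).getD 0) := by
  by_cases hk : 0 < k
  · have hsh : k >>> (1:Int) = k / 2 := shr1_eq_div k
    have htn : (k >>> (1:Int)).toNat = k.toNat / 2 := by rw [hsh]; omega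
    have hband : PySem.Int.band k 1 = PySem.Int.mod k 2 := PySem.Int.band_one k
    have hiff : PySem.Int.band k 1 = 1 ↔ k.toNat % 2 = 1 := by rw [hband]; exact mod_two_iff k hk
    rw [goA.eq_def, if_pos hk]
    rw [goA_nil_acc, goA_char arr (k >>> 1) (i+1), htn]
    by_cases hpar : k.toNat % 2 = 1
    · have hm : k.toNat = 2*(k.toNat/2)+1 := by omega
      rw [if_pos (hiff.mpr hpar), hm, setBits_odd, show (2*(k.toNat/2)+1)/2 = k.toNat/2 by omega]
      simp only [List.map_cons, List.map_map, List.cons_append, List.nil_append]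
      congr 1
      · simp
      · apply List.map_congr_left
        intro j _
        simp only [Function.comp_apply]
        congr 2
        push_cast
        ring
    · have hm : k.toNat = 2*(k.toNat/2) := by omega
      rw [if_neg (fun hc => hpar (hiff.mp hc)), hm, setBits_double,
        show (2*(k.toNat/2))/2 = k.toNat/2 by omega]
      simp only [List.map_map, List.nil_append]
      apply List.map_congr_left
      intro j _
      simp only [Function.comp_apply]
      congr 2
      push_cast
      ring
  · rw [goA.eq_def, if_neg hk]
    have : k.toNat = 0 := by omega
    rw [this, setBits_zero]
    simp
termination_by k.toNat
decreasing_by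
  all_goals simp only [shr1_eq_div]; omega

-- bitLength of the isolated lowest bit is its position plus one
theorem bitLength_pos (l : Nat) (hl : 0 < l) : 0 < PySem.Int.bitLength (l:Int) := by
  rw [PySem.Int.bitLength_natCast hl]; omega

-- the head/tail decomposition that B's loop performs on setBits
theorem head_tail : ∀ m : Nat, 0 < m →
    setBits m = (PySem.Int.bitLength ((m - (m &&& (m-1)) : Nat) : Int) - 1)
      :: setBits (m ^^^ (m - (m &&& (m-1)))) := by
  intro m hm
  induction m using Nat.strong_induction_on with
  | _ m ih =>
    by_cases hpar : m % 2 = 1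
    · obtain ⟨t, rfl⟩ : ∃ t, m = 2*t+1 := ⟨m/2, by omega⟩
      have h1 : 2*t+1-1 = 2*t := by omega
      rw [h1, and_odd_pred, show 2*t+1 - 2*t = 1 by omega, xor_one_odd,
        show PySem.Int.bitLength ((1:Nat):Int) = 1 by decide]
      rw [setBits_odd, setBits_double]
    · obtain ⟨t, rfl⟩ : ∃ t, m = 2*t := ⟨m/2, by omega⟩
      have ht : 0 < t := by omega
      obtain ⟨hlt, _⟩ := low_spec t ht
      have hL' : 0 < t - (t &&& (t-1)) := by omega
      have h1 : (2*t) &&& (2*t-1) = 2*(t &&& (t-1)) := and_even_pred t ht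
      have h2 : 2*t - 2*(t &&& (t-1)) = 2*(t - (t &&& (t-1))) := by omega
      have h3 : PySem.Int.bitLength (((2*(t - (t &&& (t-1)))) : Nat) : Int)
          = PySem.Int.bitLength (((t - (t &&& (t-1))) : Nat) : Int) + 1 := by
        rw [PySem.Int.bitLength_natCast (by omega)]
        congr 2
        omega
      rw [h1, h2, xor_two_mul, h3, setBits_double, setBits_double,
        ih t (by omega) ht]
      simp only [List.map_cons]
      congr 1
      have := bitLength_pos (t - (t &&& (t-1))) hL'
      omega

-- B computes the elements at the set-bit positions
theorem goB_char (arr : List Int) (k : Int) (acc : List Int) :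
    goB arr k acc =
      acc ++ (setBits k.toNat).map (fun (j : Nat) => (PySem.List.pyGet? arr (j:Int)).getD 0) := by
  by_cases hk : 0 < k
  · have hm : 0 < k.toNat := by omega
    have hk' : ((k.toNat : Nat) : Int) = k := by omega
    have hband : PySem.Int.band k (-k)
        = (((k.toNat - (k.toNat &&& (k.toNat-1))) : Nat) : Int) := by
      conv_lhs => rw [← hk']
      exact bandNeg k.toNat hm
    have hxor : PySem.Int.bxor k (PySem.Int.band k (-k))
        = (((k.toNat ^^^ (k.toNat - (k.toNat &&& (k.toNat-1)))) : Nat) : Int) := by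
      rw [hband]
      conv_lhs => rw [← hk']
      exact PySem.Int.bxor_natCast _ _
    obtain ⟨hlt, _⟩ := low_spec k.toNat hm
    have hL : 0 < k.toNat - (k.toNat &&& (k.toNat-1)) := by omega
    have hbl := bitLength_pos _ hL
    rw [goB.eq_def, dif_pos hk]
    simp only []
    rw [goB_char arr (PySem.Int.bxor k (PySem.Int.band k (-k)))]
    rw [hxor, hband, head_tail k.toNat hm]
    simp only [Int.toNat_natCast, List.map_cons, List.append_assoc, List.cons_append,
      List.nil_append]
    congr 3
    congr 1
    omega
  · rw [goB.eq_def, dif_neg hk]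
    have : k.toNat = 0 := by omega
    rw [this, setBits_zero]
    simp
termination_by k.toNat
decreasing_by exact goB_dec k hk

-- ===== VERDICT (by name: the statement is the Claim_ definition above) =====
theorem convertIntToSet_spec : Claim_equal_convertIntToSet := by
  intro arr num _ _
  unfold Spec_convertIntToSet convertIntToSet convertIntToSet_alt
  rw [goA_char arr num 0, goB_char arr num []]
  simp
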